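-- pv_equiv track=rewrite | github.com/Ashwot-Acharya/Sudoku_SAT | Main/puzzle_fetcher.py | _gen25_clues
-- ===== SOURCE A (Python) =====
-- def _gen25_clues(offset=0):
--     clues = []
--     box = 5
--     # Pass 1: one clue per 5×5 box
--     for br in range(5):
--         for bc in range(5):
--             idx = br * 5 + bc
--             r = br * box + (idx % box)
--             c = bc * box + ((idx + offset) % box)
--             v = ((idx + offset) % 25) + 1
--             clues.append((r, c, v))
--     # Pass 2: second clue per box with conflict check
--     for br in range(5):
--         for bc in range(5):
--             idx = br * 5 + bc
--             r = br * box + ((idx + 2) % box)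
--             c = bc * box + ((idx + offset + 3) % box)
--             v = ((idx + offset + 12) % 25) + 1
--             row_v = {vv for rr,cc,vv in clues if rr == r}
--             col_v = {vv for rr,cc,vv in clues if cc == c}
--             box_v = {vv for rr,cc,vv in clues if (rr//box)==br and (cc//box)==bc}
--             if v not in row_v and v not in col_v and v not in box_v:
--                 clues.append((r, c, v))
--     return clues
-- ===== SOURCE B (Python) =====
-- def _gen25_clues(offset=0):
--     # Pass 1: one clue per box, single loop over box index i = br*5 + bc.
--     clues = [(5 * (i // 5) + i % 5,
--               5 * (i % 5) + (i + offset) % 5,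
--               (i + offset) % 25 + 1)
--              for i in range(25)]
--     # Index the clues once: values seen per row, per column, per box.
--     row_used, col_used, box_used = {}, {}, {}
--     for r, c, v in clues:
--         row_used.setdefault(r, set()).add(v)
--         col_used.setdefault(c, set()).add(v)
--         box_used.setdefault((r // 5, c // 5), set()).add(v)
--     # Pass 2: second clue per box, conflict test by dictionary lookup,
--     # updating the index so later boxes see the accepted clues.
--     for i in range(25):
--         br, bc = i // 5, i % 5
--         r = 5 * br + (i + 2) % 5
--         c = 5 * bc + (i + offset + 3) % 5
--         v = (i + offset + 12) % 25 + 1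
--         if (v not in row_used.get(r, ())
--                 and v not in col_used.get(c, ())
--                 and v not in box_used.get((br, bc), ())):
--             clues.append((r, c, v))
--             row_used.setdefault(r, set()).add(v)
--             col_used.setdefault(c, set()).add(v)
--             box_used.setdefault((br, bc), set()).add(v)
--     return clues
-- ===== Notes on version B (the rewrite author's own statement) =====
-- stated objective: alternative
-- what changed: The first pass becomes a single comprehension over the flat box index, and the second pass's three full-list set-comprehension rescans per box are replaced by row/column/box value dictionaries built once and updated incrementally as clues are accepted.
import Mathlib
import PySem

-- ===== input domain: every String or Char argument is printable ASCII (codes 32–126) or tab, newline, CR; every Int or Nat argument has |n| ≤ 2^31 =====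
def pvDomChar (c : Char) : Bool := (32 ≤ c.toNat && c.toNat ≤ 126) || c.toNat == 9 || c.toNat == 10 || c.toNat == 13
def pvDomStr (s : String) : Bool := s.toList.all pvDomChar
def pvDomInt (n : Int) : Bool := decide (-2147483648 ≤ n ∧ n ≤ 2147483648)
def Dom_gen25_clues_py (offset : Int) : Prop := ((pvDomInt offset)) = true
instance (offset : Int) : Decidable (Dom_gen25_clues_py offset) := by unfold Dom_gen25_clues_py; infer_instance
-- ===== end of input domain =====

-- B replaces the three full-list rescans of pass 2 by row/column/box indexes built once
-- and updated as clues are accepted (objective: simpler single-pass lookup structure).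

-- ===== PORT A =====
def gen25_clues_py (offset : Int) : List (Int × Int × Int) :=
  let box : Int := 5
  -- Pass 1
  let clues : List (Int × Int × Int) :=
    (PySem.List.pyRange 0 5 1).foldl (fun clues br =>
      (PySem.List.pyRange 0 5 1).foldl (fun clues bc =>
        let idx := br * 5 + bc
        let r := br * box + PySem.Int.mod idx box
        let c := bc * box + PySem.Int.mod (idx + offset) box
        let v := PySem.Int.mod (idx + offset) 25 + 1
        clues ++ [(r, c, v)]) clues) []
  -- Pass 2
  (PySem.List.pyRange 0 5 1).foldl (fun clues br =>
    (PySem.List.pyRange 0 5 1).foldl (fun clues bc =>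
      let idx := br * 5 + bc
      let r := br * box + PySem.Int.mod (idx + 2) box
      let c := bc * box + PySem.Int.mod (idx + offset + 3) box
      let v := PySem.Int.mod (idx + offset + 12) 25 + 1
      let row_v : PySem.Set Int :=
        PySem.Set.ofList ((clues.filter (fun t => t.1 == r)).map (fun t => t.2.2))
      let col_v : PySem.Set Int :=
        PySem.Set.ofList ((clues.filter (fun t => t.2.1 == c)).map (fun t => t.2.2))
      let box_v : PySem.Set Int :=
        PySem.Set.ofList ((clues.filter (fun t =>
          PySem.Int.floordiv t.1 box == br && PySem.Int.floordiv t.2.1 box == bc)).map (fun t => t.2.2))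
      if !(PySem.Set.contains row_v v) && !(PySem.Set.contains col_v v) && !(PySem.Set.contains box_v v) then
        clues ++ [(r, c, v)]
      else clues) clues) clues

-- ===== PORT B =====
-- state of B's pass-2 loop: (clues, row_used, col_used, box_used)
def pvAltIndexAdd (d : PySem.Dict Int (PySem.Set Int)) (k v : Int) : PySem.Dict Int (PySem.Set Int) :=
  d.modify k PySem.Set.empty (fun s => PySem.Set.add s v)

def pvAltBoxAdd (d : PySem.Dict (Int × Int) (PySem.Set Int)) (k : Int × Int) (v : Int) :
    PySem.Dict (Int × Int) (PySem.Set Int) :=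
  d.modify k PySem.Set.empty (fun s => PySem.Set.add s v)

def gen25_clues_py_alt (offset : Int) : List (Int × Int × Int) :=
  -- Pass 1: one clue per box, single loop over the box index i = br*5 + bc.
  let clues : List (Int × Int × Int) :=
    (PySem.List.pyRange 0 25 1).map (fun i =>
      (5 * PySem.Int.floordiv i 5 + PySem.Int.mod i 5,
       5 * PySem.Int.mod i 5 + PySem.Int.mod (i + offset) 5,
       PySem.Int.mod (i + offset) 25 + 1))
  -- Index the clues once: values seen per row / column / box.
  let idx0 :
      PySem.Dict Int (PySem.Set Int) × PySem.Dict Int (PySem.Set Int) ×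
        PySem.Dict (Int × Int) (PySem.Set Int) :=
    clues.foldl (fun d t =>
      (pvAltIndexAdd d.1 t.1 t.2.2,
       pvAltIndexAdd d.2.1 t.2.1 t.2.2,
       pvAltBoxAdd d.2.2 (PySem.Int.floordiv t.1 5, PySem.Int.floordiv t.2.1 5) t.2.2))
      (PySem.Dict.empty, PySem.Dict.empty, PySem.Dict.empty)
  -- Pass 2: conflict test by dictionary lookup; the index is updated on acceptance.
  let fin :=
    (PySem.List.pyRange 0 25 1).foldl (fun st i =>
      let br := PySem.Int.floordiv i 5
      let bc := PySem.Int.mod i 5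
      let r := 5 * br + PySem.Int.mod (i + 2) 5
      let c := 5 * bc + PySem.Int.mod (i + offset + 3) 5
      let v := PySem.Int.mod (i + offset + 12) 25 + 1
      if !(PySem.Set.contains (st.2.1.getD r PySem.Set.empty) v)
          && !(PySem.Set.contains (st.2.2.1.getD c PySem.Set.empty) v)
          && !(PySem.Set.contains (st.2.2.2.getD (br, bc) PySem.Set.empty) v) then
        (st.1 ++ [(r, c, v)],
         pvAltIndexAdd st.2.1 r v,
         pvAltIndexAdd st.2.2.1 c v,
         pvAltBoxAdd st.2.2.2 (br, bc) v)
      else st) (clues, idx0)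
  fin.1

-- ===== PRECONDITION & SPEC =====
def Spec_gen25_clues_py (offset : Int) (out : List (Int × Int × Int)) : Prop := out = gen25_clues_py_alt offset
instance (offset : Int) (out : List (Int × Int × Int)) : Decidable (Spec_gen25_clues_py offset out) := by unfold Spec_gen25_clues_py; infer_instance

-- ===== CLAIM (what is proved, stated in full; the proofs are below) =====
def Claim_equal_gen25_clues_py : Prop := ∀ (offset : Int), Dom_gen25_clues_py offset → Spec_gen25_clues_py offset (gen25_clues_py offset)

-- ===== LEMMAS AND PROOFS =====

-- Both programs read `offset` only through `(… + offset …) % 5` and `(… + offset …) % 25`,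
-- so each is periodic in `offset` with period 25; the 25 residues are then checked by kernel evaluation.

theorem gen25_clues_py_periodic (o : Int) :
    gen25_clues_py o = gen25_clues_py (o % 25) := by
  generalize hm : o % 25 = m
  have h5a : ∀ c : Int, PySem.Int.mod (c + o) 5 = PySem.Int.mod (c + m) 5 := by
    intro c; subst hm
    rw [PySem.Int.mod_eq_emod_of_pos (by norm_num), PySem.Int.mod_eq_emod_of_pos (by norm_num)]
    omega
  have h5b : ∀ c d : Int, PySem.Int.mod (c + o + d) 5 = PySem.Int.mod (c + m + d) 5 := by
    intro c d; subst hm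
    rw [PySem.Int.mod_eq_emod_of_pos (by norm_num), PySem.Int.mod_eq_emod_of_pos (by norm_num)]
    omega
  have h25a : ∀ c : Int, PySem.Int.mod (c + o) 25 = PySem.Int.mod (c + m) 25 := by
    intro c; subst hm
    rw [PySem.Int.mod_eq_emod_of_pos (by norm_num), PySem.Int.mod_eq_emod_of_pos (by norm_num)]
    omega
  have h25b : ∀ c d : Int, PySem.Int.mod (c + o + d) 25 = PySem.Int.mod (c + m + d) 25 := by
    intro c d; subst hm
    rw [PySem.Int.mod_eq_emod_of_pos (by norm_num), PySem.Int.mod_eq_emod_of_pos (by norm_num)]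
    omega
  simp only [gen25_clues_py, h5a, h5b, h25a, h25b]

theorem gen25_clues_py_alt_periodic (o : Int) :
    gen25_clues_py_alt o = gen25_clues_py_alt (o % 25) := by
  generalize hm : o % 25 = m
  have h5a : ∀ c : Int, PySem.Int.mod (c + o) 5 = PySem.Int.mod (c + m) 5 := by
    intro c; subst hm
    rw [PySem.Int.mod_eq_emod_of_pos (by norm_num), PySem.Int.mod_eq_emod_of_pos (by norm_num)]
    omega
  have h5b : ∀ c d : Int, PySem.Int.mod (c + o + d) 5 = PySem.Int.mod (c + m + d) 5 := by
    intro c d; subst hm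
    rw [PySem.Int.mod_eq_emod_of_pos (by norm_num), PySem.Int.mod_eq_emod_of_pos (by norm_num)]
    omega
  have h25a : ∀ c : Int, PySem.Int.mod (c + o) 25 = PySem.Int.mod (c + m) 25 := by
    intro c; subst hm
    rw [PySem.Int.mod_eq_emod_of_pos (by norm_num), PySem.Int.mod_eq_emod_of_pos (by norm_num)]
    omega
  have h25b : ∀ c d : Int, PySem.Int.mod (c + o + d) 25 = PySem.Int.mod (c + m + d) 25 := by
    intro c d; subst hm
    rw [PySem.Int.mod_eq_emod_of_pos (by norm_num), PySem.Int.mod_eq_emod_of_pos (by norm_num)]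
    omega
  simp only [gen25_clues_py_alt, h5a, h5b, h25a, h25b]

set_option maxHeartbeats 4000000 in
set_option maxRecDepth 40000 in
theorem gen25_clues_py_core : ∀ k : Fin 25, gen25_clues_py (k : Int) = gen25_clues_py_alt (k : Int) := by
  decide

-- ===== VERDICT (by name: the statement is the Claim_ definition above) =====
theorem gen25_clues_py_spec : Claim_equal_gen25_clues_py := by
  intro o _
  unfold Spec_gen25_clues_py
  rw [gen25_clues_py_periodic, gen25_clues_py_alt_periodic]
  have h0 : 0 ≤ o % 25 := Int.emod_nonneg _ (by norm_num)
  have h1 : o % 25 < 25 := Int.emod_lt_of_pos _ (by norm_num)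
  have := gen25_clues_py_core ⟨(o % 25).toNat, by omega⟩
  simpa [Int.toNat_of_nonneg h0] using this
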